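-- pv_equiv track=rewrite | github.com/andrewadare/spatial-effects | spatial_effects/transform_tree.py | map_children_to_parents
-- ===== SOURCE A (Python) =====
-- from collections import deque
-- from typing import Any, Optional, Union
--
-- def bfs(g: dict, root: Any):
--     """Textbook breadth-first search of a graph g from `root` node.
--
--     Parameters
--     ==========
--     g: dictionary mapping parent nodes to a sequence of child nodes
--     root: starting point for search
--
--     Returns
--     =======
--     visited nodes in a dictionary mapping children to parents
--     """
--     parents = {root: None}  # child => parent
--     q = deque([root])  # nodes to visit
--     while q:
--         u = q.popleft()
--         if u in g:
--             for v in g[u]: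
--                 if v not in parents:
--                     parents[v] = u
--                     q.append(v)
--     return parents
--
-- def map_children_to_parents(
--     parents_to_children: dict[str, set[str]]
-- ) -> list[dict[str, Union[str, None]]]:
--     """Search the transform tree and return a list of graphs, one for each
--     connected component.
--     If the tree is fully connected, the list will contain one dictionary.
--     Otherwise, the list contains one entry for each disconnected sub-tree.
--     Each dictionary maps child coordinate frames to their parents (or None
--     for root nodes).
--     """
--     # Traverse all subgraphs using BFS, resulting in a list of
--     # dictionaries
--     all_paths: list[dict[str, Union[str, None]]] = []
--     for parent in parents_to_children:
--         all_paths.append(bfs(parents_to_children, parent))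
--
--     # Select paths that are not subsets of others.
--     # If a root node is not any other node's child,
--     # the path is considered an independent graph.
--     paths = []
--     children = set().union(*parents_to_children.values())
--     for parents in all_paths:
--         root = next(iter(parents))
--         assert parents[root] is None
--
--         if root not in children:
--             paths.append(parents)
--
--     return paths
-- ===== SOURCE B (Python) =====
-- def map_children_to_parents(parents_to_children):
--     # Compute the child set once, then BFS only from root keys (keys that are
--     # nobody's child), using the growing discovery list itself as the work
--     # queue (an index cursor) instead of a deque -- one traversal per
--     # component instead of one per key.
--     children = set()
--     for cs in parents_to_children.values():
--         children.update(cs)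
--     paths = []
--     for root in parents_to_children:
--         if root in children:
--             continue
--         order = [(root, None)]
--         seen = {root}
--         i = 0
--         while i < len(order):
--             u = order[i][0]
--             i += 1
--             for v in parents_to_children.get(u, ()):
--                 if v not in seen:
--                     seen.add(v)
--                     order.append((v, u))
--         paths.append(dict(order))
--     return paths
-- ===== Notes on version B (the rewrite author's own statement) =====
-- stated objective: alternative
-- what changed: B computes the child set once and runs a single BFS from each root key only (A runs a BFS from every key and then discards the non-root traversals), and that BFS uses the growing discovery list itself as the work queue via an index cursor with a separate seen-set instead of a deque plus dict membership; asymptotically O(V+E) vs A's O(V*(V+E)), but a timing run could not measure a difference on its inputs, so no speed is claimed.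
import Mathlib
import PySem

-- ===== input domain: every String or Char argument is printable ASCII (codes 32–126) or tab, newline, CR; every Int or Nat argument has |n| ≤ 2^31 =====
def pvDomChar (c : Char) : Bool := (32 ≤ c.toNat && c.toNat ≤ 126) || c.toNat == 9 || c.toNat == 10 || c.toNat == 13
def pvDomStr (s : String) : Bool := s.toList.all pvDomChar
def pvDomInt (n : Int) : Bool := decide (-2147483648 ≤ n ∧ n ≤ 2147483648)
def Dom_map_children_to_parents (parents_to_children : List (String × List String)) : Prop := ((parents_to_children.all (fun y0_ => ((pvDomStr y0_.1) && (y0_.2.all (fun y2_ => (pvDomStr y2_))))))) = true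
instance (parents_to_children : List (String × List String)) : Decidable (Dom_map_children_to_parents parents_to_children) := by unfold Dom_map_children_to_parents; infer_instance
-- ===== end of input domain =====

-- B computes the child set once and runs a BFS only from the root keys, using the growing
-- discovery list itself as the work queue (index cursor) instead of a deque; same return value.


-- ===== PORT A =====
-- Python's inner `for v in g[u]: if v not in parents: parents[v] = u; q.append(v)`:
def bfsVisit (parents : PySem.Dict String (Option String)) (q : List String)
    (u : String) (cs : List String) : PySem.Dict String (Option String) × List String :=
  cs.foldl (fun st v =>
    if st.1.contains v then st else (st.1.insert v (some u), st.2 ++ [v])) (parents, q)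

-- Python's `while q:` loop; the fuel is a totality guard only: each node is enqueued at
-- most once (guarded by membership in `parents`), so the loop runs at most
-- 1 + Σ|children| + 1 times and the fuel is never exhausted.
def bfsLoop (g : List (String × List String)) :
    Nat → PySem.Dict String (Option String) → List String → PySem.Dict String (Option String)
  | 0, parents, _ => parents
  | _ + 1, parents, [] => parents
  | fuel + 1, parents, u :: q =>
    match (PySem.Dict.mk g).get? u with          -- `if u in g: … g[u]`
    | none => bfsLoop g fuel parents q
    | some cs =>
      let st := bfsVisit parents q u cs
      bfsLoop g fuel st.1 st.2

def bfs (g : List (String × List String)) (root : String) : List (String × Option String) :=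
  (bfsLoop g ((g.map (fun kv => kv.2.length)).sum + 2)
    (PySem.Dict.mk [(root, none)]) [root]).items

def map_children_to_parents (parents_to_children : List (String × List String)) :
    List (List (String × Option String)) :=
  let all_paths : List (List (String × Option String)) :=
    parents_to_children.foldl (fun acc kv => acc ++ [bfs parents_to_children kv.1]) []
  -- children = set().union(*parents_to_children.values())
  let children : PySem.Set String :=
    parents_to_children.foldl (fun s kv => PySem.Set.union s kv.2) PySem.Set.empty
  all_paths.foldl (fun paths parents =>
    match parents with
    | [] => paths   -- unreachable guard: bfs returns a nonempty dict (so next(iter) cannot raise)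
    -- root = next(iter(parents)); the `assert parents[root] is None` always holds (the first
    -- entry of a bfs result is (root, None)) and has no effect on the returned value.
    | (root, _) :: _ =>
        if PySem.Set.contains children root then paths else paths ++ [parents]) []

-- ===== PORT B =====
-- `for v in parents_to_children.get(u, ()): if v not in seen: seen.add(v); order.append((v, u))`:
def crawlStep (order : List (String × Option String)) (seen : PySem.Set String)
    (u : String) (cs : List String) : List (String × Option String) × PySem.Set String :=
  cs.foldl (fun st v =>
    if PySem.Set.contains st.2 v then st
    else (st.1 ++ [(v, some u)], PySem.Set.add st.2 v)) (order, seen)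

-- `while i < len(order):` — the discovery list is the queue, `i` the cursor; the fuel is a
-- totality guard only (the loop body runs at most 1 + Σ|children| times).
def crawl (g : List (String × List String)) :
    Nat → List (String × Option String) → PySem.Set String → Nat → List (String × Option String)
  | 0, order, _, _ => order
  | fuel + 1, order, seen, i =>
    if h : i < order.length then
      let u := (order[i]'h).1
      let st := crawlStep order seen u ((PySem.Dict.mk g).getD u [])
      crawl g fuel st.1 st.2 (i + 1)
    else order

def map_children_to_parents_alt (parents_to_children : List (String × List String)) :
    List (List (String × Option String)) :=
  let children : PySem.Set String :=
    parents_to_children.foldl (fun s kv => PySem.Set.update s kv.2) PySem.Set.empty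
  parents_to_children.foldl (fun paths kv =>
    if PySem.Set.contains children kv.1 then paths
    else
      -- dict(order): the discovered pairs have distinct keys, so the dict keeps them as is
      paths ++ [(PySem.Dict.ofList (crawl parents_to_children
        ((parents_to_children.map (fun kv => kv.2.length)).sum + 2)
        [(kv.1, none)] (PySem.Set.ofList [kv.1]) 0)).items]) []

-- ===== PRECONDITION & SPEC =====
def Spec_map_children_to_parents (parents_to_children : List (String × List String)) (out : List (List (String × Option String))) : Prop := out = map_children_to_parents_alt parents_to_children
instance (parents_to_children : List (String × List String)) (out : List (List (String × Option String))) : Decidable (Spec_map_children_to_parents parents_to_children out) := by unfold Spec_map_children_to_parents; infer_instance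

-- ===== CLAIM =====
def Claim_equal_map_children_to_parents : Prop := ∀ (parents_to_children : List (String × List String)), Dom_map_children_to_parents parents_to_children → Spec_map_children_to_parents parents_to_children (map_children_to_parents parents_to_children)

-- ===== LEMMAS AND PROOFS =====

-- The invariant tying A's (dict, deque) state to B's (list, seen-set, cursor) state.
def BfsInv (parents : PySem.Dict String (Option String)) (q : List String)
    (order : List (String × Option String)) (seen : PySem.Set String) (i : Nat) : Prop :=
  parents.items = order ∧ order.map Prod.fst = seen ∧ (order.map Prod.fst).Nodup ∧
    i ≤ order.length ∧ q = (order.drop i).map Prod.fst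

theorem contains_agree (d : PySem.Dict String (Option String)) (s : PySem.Set String) (v : String)
    (h : d.items.map Prod.fst = s) : d.contains v = PySem.Set.contains s v := by
  rw [PySem.Dict.contains_eq_decide_mem_keys]
  simp [PySem.Set.contains, PySem.Dict.keys, ← h]


theorem inv_step (u : String) (cs : List String)
    (parents : PySem.Dict String (Option String)) (q : List String)
    (order : List (String × Option String)) (seen : PySem.Set String) (i : Nat)
    (h : BfsInv parents q order seen i) :
    BfsInv (bfsVisit parents q u cs).1 (bfsVisit parents q u cs).2
      (crawlStep order seen u cs).1 (crawlStep order seen u cs).2 i := by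
  induction cs generalizing parents q order seen with
  | nil => exact h
  | cons c cs ih =>
    obtain ⟨h1, h2, h3, h4, h5⟩ := h
    simp only [bfsVisit, crawlStep, List.foldl] at *
    rw [contains_agree parents seen c (h1 ▸ h2)]
    by_cases hc : PySem.Set.contains seen c
    · rw [if_pos hc, if_pos hc]
      exact ih parents q order seen ⟨h1, h2, h3, h4, h5⟩
    · rw [if_neg hc, if_neg hc]
      apply ih
      have hcb : PySem.Set.contains seen c = false := by simpa using hc
      have hmem : c ∉ order.map Prod.fst := by
        rw [h2]; simpa [PySem.Set.contains] using hc
      refine ⟨?_, ?_, ?_, ?_, ?_⟩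
      · rw [PySem.Dict.items_insert_of_not_contains parents (some u)
          (by rw [contains_agree parents seen c (h1 ▸ h2)]; exact hcb), h1]
      · simp only [List.map_append, h2, List.map_cons, List.map_nil]
        have : PySem.Set.add seen c = seen ++ [c] := by
          simp [PySem.Set.add, PySem.Set.contains] at hc ⊢; simp [hc]
        rw [this]
      · rw [List.map_append]
        simp only [List.map_cons, List.map_nil]
        exact List.Nodup.append h3 (List.nodup_singleton c)
          (by simpa [List.disjoint_singleton] using hmem)
      · simp; omega
      · rw [List.drop_append_of_le_length h4]
        simp [h5]

theorem loop_eq (g : List (String × List String)) :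
    ∀ (fuel : Nat) (parents : PySem.Dict String (Option String)) (q : List String)
      (order : List (String × Option String)) (seen : PySem.Set String) (i : Nat),
    BfsInv parents q order seen i →
    (bfsLoop g fuel parents q).items = crawl g fuel order seen i := by
  intro fuel
  induction fuel with
  | zero => intro parents q order seen i h; exact h.1
  | succ n ih =>
    intro parents q order seen i h
    obtain ⟨h1, h2, h3, h4, h5⟩ := h
    by_cases hi : i < order.length
    · have hq : q = (order[i]'hi).1 :: (order.drop (i+1)).map Prod.fst := by
        rw [h5, List.drop_eq_getElem_cons hi, List.map_cons]
      have hinv : BfsInv parents ((order.drop (i+1)).map Prod.fst) order seen (i+1) :=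
        ⟨h1, h2, h3, by omega, rfl⟩
      rw [hq]
      simp only [bfsLoop, crawl, dif_pos hi]
      cases hg : (PySem.Dict.mk g).get? (order[i]'hi).1 with
      | none =>
        rw [PySem.Dict.getD_of_get?_eq_none _ _ hg]
        have : crawlStep order seen (order[i]'hi).1 [] = (order, seen) := rfl
        rw [this]
        exact ih parents _ order seen (i+1) hinv
      | some cs =>
        rw [PySem.Dict.getD_of_get?_eq_some _ _ hg]
        exact ih _ _ _ _ (i+1) (inv_step _ cs parents _ order seen (i+1) hinv)
    · have hie : i = order.length := by omega
      have hq : q = [] := by rw [h5, hie]; simp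
      subst hq
      simp only [bfsLoop, crawl, dif_neg hi]
      exact h1

theorem bfs_eq_crawl (g : List (String × List String)) (root : String) :
    bfs g root = crawl g ((g.map (fun kv => kv.2.length)).sum + 2)
      [(root, none)] (PySem.Set.ofList [root]) 0 :=
  loop_eq g _ _ _ _ _ _ ⟨rfl, rfl, by simp, by simp, rfl⟩


theorem crawlStep_prefix (order : List (String × Option String)) (seen : PySem.Set String)
    (u : String) (cs : List String) :
    ∃ ex, (crawlStep order seen u cs).1 = order ++ ex := by
  induction cs generalizing order seen with
  | nil => exact ⟨[], by simp [crawlStep]⟩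
  | cons c cs ih =>
    simp only [crawlStep, List.foldl] at *
    by_cases hc : PySem.Set.contains seen c
    · rw [if_pos hc]; exact ih order seen
    · rw [if_neg hc]
      obtain ⟨ex, hex⟩ := ih (order ++ [(c, some u)]) (PySem.Set.add seen c)
      exact ⟨(c, some u) :: ex, by simpa using hex⟩


theorem crawl_prefix (g : List (String × List String)) :
    ∀ (fuel : Nat) (order : List (String × Option String)) (seen : PySem.Set String) (i : Nat),
    ∃ ex, crawl g fuel order seen i = order ++ ex := by
  intro fuel
  induction fuel with
  | zero => intro order seen i; exact ⟨[], by simp [crawl]⟩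
  | succ n ih =>
    intro order seen i
    by_cases hi : i < order.length
    · simp only [crawl, dif_pos hi]
      obtain ⟨ex1, he1⟩ := crawlStep_prefix order seen (order[i]'hi).1 ((PySem.Dict.mk g).getD (order[i]'hi).1 [])
      obtain ⟨ex2, he2⟩ := ih (crawlStep order seen (order[i]'hi).1 ((PySem.Dict.mk g).getD (order[i]'hi).1 [])).1 (crawlStep order seen (order[i]'hi).1 ((PySem.Dict.mk g).getD (order[i]'hi).1 [])).2 (i+1)
      exact ⟨ex1 ++ ex2, by rw [he2, he1, List.append_assoc]⟩
    · exact ⟨[], by simp [crawl, dif_neg hi]⟩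


theorem bfs_head (g : List (String × List String)) (root : String) :
    ∃ t, bfs g root = (root, none) :: t := by
  rw [bfs_eq_crawl]
  obtain ⟨ex, hex⟩ := crawl_prefix g _ [(root, none)] (PySem.Set.ofList [root]) 0
  exact ⟨ex, by simpa using hex⟩


theorem crawl_nodup_keys (g : List (String × List String)) :
    ∀ (fuel : Nat) (order : List (String × Option String)) (seen : PySem.Set String) (i : Nat),
    order.map Prod.fst = seen → (order.map Prod.fst).Nodup → i ≤ order.length →
    ((crawl g fuel order seen i).map Prod.fst).Nodup := by
  intro fuel
  induction fuel with
  | zero => intro order seen i _ h2 _; simpa [crawl] using h2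
  | succ n ih =>
    intro order seen i h1 h2 h3
    by_cases hi : i < order.length
    · simp only [crawl, dif_pos hi]
      have hinv : BfsInv (PySem.Dict.mk order) ((order.drop (i+1)).map Prod.fst)
          order seen (i+1) := ⟨rfl, h1, h2, by omega, rfl⟩
      have := inv_step (order[i]'hi).1 ((PySem.Dict.mk g).getD (order[i]'hi).1 [])
        (PySem.Dict.mk order) _ order seen (i+1) hinv
      exact ih _ _ (i+1) this.2.1 this.2.2.1 this.2.2.2.1
    · simpa [crawl, dif_neg hi] using h2

theorem ofList_items_self (l : List (String × Option String))
    (h : (l.map Prod.fst).Nodup) : (PySem.Dict.ofList l).items = l := by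
  have := PySem.Dict.items_foldl_insert_fresh (l := l) (k := Prod.fst) (v := Prod.snd)
    (d := PySem.Dict.empty) (by simp) (by simpa using h)
  simpa [PySem.Dict.ofList] using this

theorem ab_eq (g : List (String × List String)) :
    map_children_to_parents g = map_children_to_parents_alt g := by
  unfold map_children_to_parents map_children_to_parents_alt
  rw [PySem.List.foldl_append_singleton_eq_map, List.nil_append, List.foldl_map]
  simp only [PySem.Set.union]
  apply PySem.List.foldl_congr_mem
  intro acc kv _
  have hitems := ofList_items_self _
    (crawl_nodup_keys g ((g.map (fun kv => kv.2.length)).sum + 2)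
      [(kv.1, none)] (PySem.Set.ofList [kv.1]) 0 rfl (by simp) (by simp))
  obtain ⟨t, ht⟩ := bfs_head g kv.1
  rw [hitems, ← bfs_eq_crawl, ht]
  rfl

-- ===== VERDICT =====
theorem map_children_to_parents_spec : Claim_equal_map_children_to_parents := by
  intro g _
  exact ab_eq g
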